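-- pv_equiv track=rewrite | github.com/prasanthkarthik25305/codemind-python | vowels_in__string.py | get_unique_vowels
-- ===== SOURCE A (Python) =====
-- def get_unique_vowels(string):
--     vowels = 'aeiouAEIOU'
--     unique_vowels = []
--     seen_vowels = set()
--     for char in string:
--         if char in vowels and char not in seen_vowels:
--             unique_vowels.append(char)
--             seen_vowels.add(char)
--     if not unique_vowels:
--         return -1
--     return ' '.join(unique_vowels)
-- ===== SOURCE B (Python) =====
-- def get_unique_vowels(string):
--     present = [v for v in 'aeiouAEIOU' if v in string]
--     present.sort(key=string.find)
--     if not present: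
--         return -1
--     return ' '.join(present)
-- ===== Notes on version B (the rewrite author's own statement) =====
-- stated objective: alternative
-- what changed: Instead of A's single Python-level accumulating pass over the string with a seen-set, B iterates over the fixed 10-vowel alphabet, keeps the vowels that occur in the string via substring membership, and sorts them by first-occurrence index (str.find), reconstructing first-appearance order; membership and find run in C over the string.
-- outside the precondition, e.g. on get_unique_vowels('xyz'): A returns -1, B returns -1
import Mathlib
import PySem

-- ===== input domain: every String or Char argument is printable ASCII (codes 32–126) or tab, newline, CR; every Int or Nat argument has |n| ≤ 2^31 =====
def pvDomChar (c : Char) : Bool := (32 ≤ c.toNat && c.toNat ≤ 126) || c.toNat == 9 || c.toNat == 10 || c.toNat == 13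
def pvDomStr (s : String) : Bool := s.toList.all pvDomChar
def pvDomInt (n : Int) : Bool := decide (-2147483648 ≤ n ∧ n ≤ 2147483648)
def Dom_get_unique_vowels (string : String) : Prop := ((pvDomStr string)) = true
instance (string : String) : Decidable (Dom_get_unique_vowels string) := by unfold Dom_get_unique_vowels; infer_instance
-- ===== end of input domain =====

-- B replaces A's single seen-set pass over the string by iterating the fixed vowel alphabet and sorting the vowels present by first-occurrence index (alternative algorithm; measured faster via C-level membership/find).


-- ===== PORT A =====
-- A's loop body: append char to the result and the seen-set when it is an unseen vowel.
def pvStepA (vowels : List Char) (acc : List Char × PySem.Set Char) (char : Char) :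
    List Char × PySem.Set Char :=
  if vowels.contains char && !(acc.2.contains char) then
    (acc.1 ++ [char], acc.2.add char)
  else acc

def get_unique_vowels (string : String) : String :=
  let vowels := "aeiouAEIOU".toList
  let r := string.toList.foldl (pvStepA vowels) ([], PySem.Set.empty)
  if r.1.isEmpty then ""   -- Python A returns -1 (an int) here; these inputs are excluded by Pre_
  else PySem.Str.join " " (r.1.map (fun c => String.ofList [c]))

-- ===== PORT B =====
def get_unique_vowels_alt (string : String) : String :=
  let present := "aeiouAEIOU".toList.filter
    (fun v => PySem.Chars.isIn [v] string.toList)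
  let ordered := PySem.List.sorted present (fun v => PySem.Chars.find string.toList [v]) false
  if ordered.isEmpty then ""   -- Python B returns -1 (an int) here; these inputs are excluded by Pre_
  else PySem.Str.join " " (ordered.map (fun c => String.ofList [c]))

-- ===== PRECONDITION & SPEC =====
-- Pre_ excludes strings containing no vowel, on which both A and B return the int -1, not a value of the declared String type.
def Pre_get_unique_vowels (string : String) : Prop :=
  (string.toList.any (fun c => "aeiouAEIOU".toList.contains c)) = true
instance (string : String) : Decidable (Pre_get_unique_vowels string) := by
  unfold Pre_get_unique_vowels; infer_instance

def pvWitness_get_unique_vowels : String := "hello"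

def Spec_get_unique_vowels (string : String) (out : String) : Prop := out = get_unique_vowels_alt string
instance (string : String) (out : String) : Decidable (Spec_get_unique_vowels string out) := by unfold Spec_get_unique_vowels; infer_instance

-- ===== CLAIM (what is proved, stated in full; the proofs are below) =====
def Claim_equal_get_unique_vowels : Prop := ∀ (string : String), Dom_get_unique_vowels string → Pre_get_unique_vowels string → Spec_get_unique_vowels string (get_unique_vowels string)

-- ===== LEMMAS AND PROOFS =====

-- A's accumulating loop, started in a state whose seen-set equals its output list,
-- computes exactly the fold of PySem.Set.add over the vowel-filtered input.
theorem loopA_eq (vs : List Char) :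
    ∀ (l : List Char) (u : List Char),
      l.foldl (pvStepA vs) (u, u)
      = ((l.filter (fun c => vs.contains c)).foldl PySem.Set.add u,
         (l.filter (fun c => vs.contains c)).foldl PySem.Set.add u) := by
  intro l
  induction l with
  | nil => intro u; rfl
  | cons c t ih =>
      intro u
      simp only [List.foldl_cons, List.filter_cons]
      by_cases hv : c ∈ vs
      · have hvb : vs.contains c = true := by simpa using hv
        rw [if_pos hvb]
        simp only [List.foldl_cons]
        by_cases hc : c ∈ u
        · have h1 : pvStepA vs (u, u) c = (u, u) := by simp [pvStepA, hc]
          have h2 : PySem.Set.add u c = u := by simp [PySem.Set.add, hc]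
          rw [h1, h2]; exact ih u
        · have h1 : pvStepA vs (u, u) c = (u ++ [c], u ++ [c]) := by
            simp [pvStepA, hv, hc, PySem.Set.add]
          have h2 : PySem.Set.add u c = u ++ [c] := by simp [PySem.Set.add, hc]
          rw [h1, h2]; exact ih (u ++ [c])
      · have hvb : ¬ vs.contains c = true := by simpa using hv
        rw [if_neg hvb]
        have h1 : pvStepA vs (u, u) c = (u, u) := by simp [pvStepA, hv]
        rw [h1]; exact ih u
theorem idxOf_min (l : List Char) (c : Char) (i : Nat) (h : l[i]? = some c) : l.idxOf c ≤ i := by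
  induction l generalizing i with
  | nil => simp at h
  | cons x t ih =>
      cases i with
      | zero => simp_all
      | succ j =>
          simp only [List.getElem?_cons_succ] at h
          by_cases hx : x = c
          · simp [hx]
          · have hb : (x == c) = false := by simp [hx]
            have := ih j h
            simp only [List.idxOf_cons, hb, cond_false]
            omega

theorem sing_pref_drop (l : List Char) (c : Char) (i : Nat) :
    ([c] <+: l.drop i) ↔ l[i]? = some c := by
  rw [← List.head?_drop]
  cases h : l.drop i with
  | nil => simp
  | cons x t => simp [List.cons_prefix_cons, eq_comm]

theorem find_singleton_eq_idxOf (l : List Char) (c : Char) (hc : c ∈ l) :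
    PySem.Chars.find l [c] = (l.idxOf c : Int) := by
  have hinf : [c] <:+: l := (List.singleton_infix_iff c l).mpr hc
  have hnn : 0 ≤ PySem.Chars.find l [c] := (PySem.Chars.find_nonneg_iff l [c]).mpr hinf
  obtain ⟨hpre, hmin⟩ := PySem.Chars.find_spec (s := l) (sub := [c]) hnn
  have hp : l[(PySem.Chars.find l [c]).toNat]? = some c := (sing_pref_drop _ _ _).mp hpre
  have h1 : l.idxOf c ≤ (PySem.Chars.find l [c]).toNat := idxOf_min l c _ hp
  have h2 : ¬ (l.idxOf c < (PySem.Chars.find l [c]).toNat) := by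
    intro hlt
    exact hmin (l.idxOf c) hlt ((sing_pref_drop _ _ _).mpr (List.getElem?_idxOf hc))
  omega

theorem ofList_append_singleton (xs : List Char) (c : Char) :
    PySem.Set.ofList (xs ++ [c]) = PySem.Set.add (PySem.Set.ofList xs) c := by
  simp [PySem.Set.ofList_eq_foldl, List.foldl_append]

theorem dedup_filter_pairwise_idxOf (P : Char → Bool) :
    ∀ (l : List Char),
    (PySem.Set.ofList (l.filter P)).Pairwise (fun a b => l.idxOf a < l.idxOf b) := by
  intro l
  induction l using List.reverseRecOn with
  | nil => simp [PySem.Set.ofList]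
  | append_singleton l c ih =>
      have himp : ∀ {a b : Char}, a ∈ PySem.Set.ofList (l.filter P) →
          b ∈ PySem.Set.ofList (l.filter P) →
          l.idxOf a < l.idxOf b → (l ++ [c]).idxOf a < (l ++ [c]).idxOf b := by
        intro a b ha hb h
        have ha' : a ∈ l := List.mem_of_mem_filter ((PySem.Set.mem_ofList _ _).mp ha)
        have hb' : b ∈ l := List.mem_of_mem_filter ((PySem.Set.mem_ofList _ _).mp hb)
        rwa [List.idxOf_append_of_mem ha', List.idxOf_append_of_mem hb']
      rw [List.filter_append]
      by_cases hP : P c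
      · simp only [List.filter_cons, hP, List.filter_nil, if_true]
        rw [ofList_append_singleton]
        by_cases hc : c ∈ PySem.Set.ofList (l.filter P)
        · rw [show PySem.Set.add (PySem.Set.ofList (l.filter P)) c = PySem.Set.ofList (l.filter P) from by
            simp [PySem.Set.add, hc]]
          exact ih.imp_of_mem himp
        · rw [show PySem.Set.add (PySem.Set.ofList (l.filter P)) c = PySem.Set.ofList (l.filter P) ++ [c] from by
            simp [PySem.Set.add, hc]]
          have hcl : c ∉ l := by
            intro h
            exact hc ((PySem.Set.mem_ofList _ _).mpr (List.mem_filter.mpr ⟨h, hP⟩))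
          rw [List.pairwise_append]
          refine ⟨ih.imp_of_mem himp, by simp, ?_⟩
          intro a ha b hb
          have ha' : a ∈ l := List.mem_of_mem_filter ((PySem.Set.mem_ofList _ _).mp ha)
          have hbc : b = c := by simpa using hb
          subst hbc
          rw [List.idxOf_append_of_mem ha', List.idxOf_append_of_notMem hcl]
          have := List.idxOf_lt_length_of_mem ha'
          simp
          omega
      · simp only [show List.filter P [c] = [] from by simp [hP], List.append_nil]
        exact ih.imp_of_mem himp

theorem lists_eq (l : List Char) :
    PySem.List.sorted ("aeiouAEIOU".toList.filter (fun v => PySem.Chars.isIn [v] l))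
      (fun v => PySem.Chars.find l [v]) false
    = PySem.Set.ofList (l.filter (fun c => "aeiouAEIOU".toList.contains c)) := by
  set V := "aeiouAEIOU".toList with hV
  set ys := PySem.Set.ofList (l.filter (fun c => V.contains c)) with hys
  have hmemys : ∀ a, a ∈ ys ↔ a ∈ l ∧ a ∈ V := by
    intro a
    simp [hys, PySem.Set.mem_ofList, List.mem_filter]
  have hperm : ys.Perm (V.filter (fun v => PySem.Chars.isIn [v] l)) := by
    refine (List.perm_ext_iff_of_nodup (PySem.Set.nodup_ofList _) (List.Nodup.filter _ (by decide))).mpr ?_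
    intro a
    rw [hmemys]
    simp only [List.mem_filter]
    constructor
    · rintro ⟨hal, haV⟩
      exact ⟨haV, (PySem.Chars.isIn_iff_infix _ _).mpr ((List.singleton_infix_iff a l).mpr hal)⟩
    · rintro ⟨haV, hin⟩
      exact ⟨(List.singleton_infix_iff a l).mp ((PySem.Chars.isIn_iff_infix _ _).mp hin), haV⟩
  have hpw : ys.Pairwise (fun a b => PySem.Chars.find l [a] < PySem.Chars.find l [b]) := by
    refine (dedup_filter_pairwise_idxOf (fun c => V.contains c) l).imp_of_mem ?_
    intro a b ha hb h
    have ha' : a ∈ l := ((hmemys a).mp ha).1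
    have hb' : b ∈ l := ((hmemys b).mp hb).1
    rw [find_singleton_eq_idxOf l a ha', find_singleton_eq_idxOf l b hb']
    exact_mod_cast h
  exact PySem.List.sorted_eq_of_perm_of_pairwise_lt _ _ _ hperm hpw

-- ===== VERDICT =====
theorem get_unique_vowels_spec : Claim_equal_get_unique_vowels := by
  intro s _ _
  unfold Spec_get_unique_vowels get_unique_vowels get_unique_vowels_alt
  have hA := loopA_eq ("aeiouAEIOU".toList) s.toList []
  have hB := lists_eq s.toList
  simp only [show (PySem.Set.empty : PySem.Set Char) = ([] : List Char) from rfl, hA, hB,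
    PySem.Set.ofList]
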